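-- pv_equiv track=rewrite | github.com/eFLAWS/ESGI-L2 | AlgoAvancée/#exos.py | onlyDoub
-- ===== SOURCE A (Python) =====
-- def onlyDoub(tab) :
--     for i in range (len(tab)) :
--         doub = False
--         for j in range (len(tab)) :
--             if i != j :
--                 if tab[i] == tab[j] : doub = True
--         if doub == False : return False
--     return True
-- ===== SOURCE B (Python) =====
-- def onlyDoub(tab):
--     counts = {}
--     for x in tab:
--         counts[x] = counts.get(x, 0) + 1
--     return all(c >= 2 for c in counts.values())
-- ===== Notes on version B (the rewrite author's own statement) =====
-- stated objective: faster
-- what changed: Replaces the quadratic nested index scan with a single pass that builds a value->count dictionary and then checks every count is at least 2.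
import Mathlib
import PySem

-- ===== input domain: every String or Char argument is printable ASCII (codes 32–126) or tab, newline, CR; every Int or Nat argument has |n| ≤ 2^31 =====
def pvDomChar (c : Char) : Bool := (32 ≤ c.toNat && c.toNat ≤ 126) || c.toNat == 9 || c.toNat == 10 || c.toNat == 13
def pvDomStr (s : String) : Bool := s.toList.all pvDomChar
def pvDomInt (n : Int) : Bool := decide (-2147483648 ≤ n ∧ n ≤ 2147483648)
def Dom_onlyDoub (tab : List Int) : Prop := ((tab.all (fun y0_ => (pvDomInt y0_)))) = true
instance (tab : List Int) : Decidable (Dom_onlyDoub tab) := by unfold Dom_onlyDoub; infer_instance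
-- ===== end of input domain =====

-- B replaces A's quadratic nested index scan by one counting pass over a dictionary
-- followed by a check that every count is at least 2 (objective: faster, O(n^2) → O(n)).

-- ===== PORT A =====
-- inner 'for j in range(len(tab))' loop computing the flag 'doub' for a fixed i
def onlyDoubInner (tab : List Int) (i : Int) : Bool :=
  (PySem.List.pyRange 0 (PySem.List.len tab) 1).foldl
    (fun doub j =>
      if i ≠ j then
        if PySem.List.pyGetD tab i 0 = PySem.List.pyGetD tab j 0 then true else doub
      else doub)
    false

-- outer 'for i in range(len(tab))' loop with its early 'return False'
def onlyDoubOuter (tab : List Int) : List Int → Bool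
  | [] => true
  | i :: rest =>
      let doub := onlyDoubInner tab i
      if doub = false then false else onlyDoubOuter tab rest

def onlyDoub (tab : List Int) : Bool :=
  onlyDoubOuter tab (PySem.List.pyRange 0 (PySem.List.len tab) 1)

-- ===== PORT B =====
def onlyDoub_alt (tab : List Int) : Bool :=
  let counts : PySem.Dict Int Int :=
    tab.foldl (fun d x => d.insert x (d.getD x 0 + 1)) PySem.Dict.empty
  counts.values.all (fun c => 2 ≤ c)

-- ===== PRECONDITION & SPEC =====
def Spec_onlyDoub (tab : List Int) (out : Bool) : Prop := out = onlyDoub_alt tab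
instance (tab : List Int) (out : Bool) : Decidable (Spec_onlyDoub tab out) := by unfold Spec_onlyDoub; infer_instance

-- ===== CLAIM (what is proved, stated in full; the proofs are below) =====
def Claim_equal_onlyDoub : Prop := ∀ (tab : List Int), Dom_onlyDoub tab → Spec_onlyDoub tab (onlyDoub tab)

-- ===== LEMMAS AND PROOFS =====

-- the inner foldl is an accumulated 'any'
lemma onlyDoub_foldl_flag (tab : List Int) (i : Int) :
    ∀ (l : List Int) (b : Bool),
      l.foldl
        (fun doub j =>
          if i ≠ j then
            if PySem.List.pyGetD tab i 0 = PySem.List.pyGetD tab j 0 then true else doub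
          else doub) b
      = (b || l.any (fun j =>
          decide (i ≠ j) && decide (PySem.List.pyGetD tab i 0 = PySem.List.pyGetD tab j 0))) := by
  intro l
  induction l with
  | nil => simp
  | cons x xs ih =>
      intro b
      simp only [List.foldl_cons, List.any_cons, ih]
      by_cases h1 : i ≠ x <;>
        by_cases h2 : PySem.List.pyGetD tab i 0 = PySem.List.pyGetD tab x 0 <;>
          simp [h1, h2]

-- inner flag for a valid index n: true iff tab[n] occurs at some other index
lemma onlyDoubInner_eq (tab : List Int) (n : Nat) (h : n < tab.length) :
    onlyDoubInner tab (n : Int) = true ↔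
      ∃ j, ∃ _ : j < tab.length, j ≠ n ∧ tab[j] = tab[n] := by
  unfold onlyDoubInner
  rw [onlyDoub_foldl_flag, PySem.List.len_eq, PySem.List.pyRange_zero_natCast]
  simp only [Bool.false_or, List.any_map, List.any_eq_true, Function.comp,
    Bool.and_eq_true, decide_eq_true_eq, List.mem_range]
  constructor
  · rintro ⟨j, hj, hne, heq⟩
    refine ⟨j, hj, ?_, ?_⟩
    · intro hc; exact hne (by exact_mod_cast congrArg (Nat.cast : Nat → Int) hc.symm)
    · simp only [PySem.List.pyGetD_natCast, List.getD_eq_getElem _ _ h,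
        List.getD_eq_getElem _ _ hj] at heq
      exact heq.symm
  · rintro ⟨j, hj, hne, heq⟩
    refine ⟨j, hj, ?_, ?_⟩
    · intro hc; exact hne (by exact_mod_cast hc.symm)
    · simp only [PySem.List.pyGetD_natCast, List.getD_eq_getElem _ _ h,
        List.getD_eq_getElem _ _ hj]
      exact heq.symm

-- a value at a valid index has a second occurrence iff its count is at least 2
lemma onlyDoub_count_two_iff (tab : List Int) (n : Nat) (h : n < tab.length) :
    (∃ j, ∃ _ : j < tab.length, j ≠ n ∧ tab[j] = tab[n]) ↔ 2 ≤ tab.count tab[n] := by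
  rw [← List.mem_eraseIdx_iff_getElem,
      ← (List.getElem_cons_eraseIdx_perm h).count_eq, List.count_cons_self,
      ← List.count_pos_iff]
  omega

-- the outer loop with early return is 'all'
lemma onlyDoubOuter_eq_all (tab : List Int) :
    ∀ l : List Int, onlyDoubOuter tab l = l.all (onlyDoubInner tab) := by
  intro l
  induction l with
  | nil => rfl
  | cons x xs ih =>
      simp only [onlyDoubOuter, ih, List.all_cons]
      by_cases hx : onlyDoubInner tab x = false
      · simp [hx]
      · simp only [Bool.not_eq_false] at hx; simp [hx]

-- A decides 'every element of tab has count at least 2'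
lemma onlyDoub_iff (tab : List Int) :
    onlyDoub tab = true ↔ ∀ v ∈ tab, 2 ≤ tab.count v := by
  unfold onlyDoub
  rw [onlyDoubOuter_eq_all, PySem.List.len_eq, PySem.List.pyRange_zero_natCast]
  simp only [List.all_map, List.all_eq_true, Function.comp, List.mem_range]
  constructor
  · intro hall v hv
    rcases List.mem_iff_getElem.mp hv with ⟨n, hn, rfl⟩
    exact (onlyDoub_count_two_iff tab n hn).mp ((onlyDoubInner_eq tab n hn).mp (hall n hn))
  · intro hall n hn
    exact (onlyDoubInner_eq tab n hn).mpr
      ((onlyDoub_count_two_iff tab n hn).mpr (hall tab[n] (tab.getElem_mem hn)))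

-- B decides the same property
lemma onlyDoub_alt_iff (tab : List Int) :
    onlyDoub_alt tab = true ↔ ∀ v ∈ tab, 2 ≤ tab.count v := by
  simp only [onlyDoub_alt, PySem.Dict.foldl_insert_getD_add_one_eq_counter]
  rw [PySem.Dict.values_eq_map_keys _ (PySem.Dict.nodup_keys_counter tab) 0,
      PySem.Dict.keys_counter]
  simp only [List.all_map, List.all_eq_true, Function.comp, PySem.Dict.getD_counter,
    decide_eq_true_eq, PySem.Set.mem_ofList]
  constructor
  · intro hall v hv; exact_mod_cast hall v hv
  · intro hall v hv; exact_mod_cast hall v hv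

-- ===== VERDICT (by name: the statement is the Claim_ definition above) =====
theorem onlyDoub_spec : Claim_equal_onlyDoub := by
  intro tab _
  unfold Spec_onlyDoub
  rw [Bool.eq_iff_iff, onlyDoub_iff, onlyDoub_alt_iff]
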